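-- pv_equiv track=rewrite | github.com/YallaPapi/pubscrape | src/agents/exporter_agent.py | _calculate_quality_distribution
-- ===== SOURCE A (Python) =====
-- from typing import Dict, Any, List, Optional, Union, Tuple
--
-- def _calculate_quality_distribution(data: List[Dict[str, Any]]) -> Dict[str, int]:
--     """Calculate quality distribution of contacts"""
--     distribution = {
--         'high_quality': 0,
--         'medium_quality': 0,
--         'low_quality': 0,
--         'unknown_quality': 0
--     }
--
--     for record in data:
--         confidence = record.get('contact_confidence', '').lower()
--         if confidence in ['very_high', 'high']:
--             distribution['high_quality'] += 1
--         elif confidence in ['medium']: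
--             distribution['medium_quality'] += 1
--         elif confidence in ['low', 'very_low']:
--             distribution['low_quality'] += 1
--         else:
--             distribution['unknown_quality'] += 1
--
--     return distribution
-- ===== SOURCE B (Python) =====
-- def _calculate_quality_distribution(data):
--     """Calculate quality distribution of contacts"""
--     cnt = {}
--     for record in data:
--         c = record.get('contact_confidence', '').lower()
--         cnt[c] = cnt.get(c, 0) + 1
--     high = cnt.get('very_high', 0) + cnt.get('high', 0)
--     medium = cnt.get('medium', 0)
--     low = cnt.get('low', 0) + cnt.get('very_low', 0)
--     return {
--         'high_quality': high,
--         'medium_quality': medium,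
--         'low_quality': low,
--         'unknown_quality': len(data) - high - medium - low
--     }
-- ===== Notes on version B (the rewrite author's own statement) =====
-- stated objective: simpler
-- what changed: Replaces the four-branch if/elif classification loop with a one-pass frequency table keyed by the raw lowercased confidence string, reading the four buckets off the table afterwards and getting unknown_quality by subtraction from len(data).
import Mathlib
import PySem

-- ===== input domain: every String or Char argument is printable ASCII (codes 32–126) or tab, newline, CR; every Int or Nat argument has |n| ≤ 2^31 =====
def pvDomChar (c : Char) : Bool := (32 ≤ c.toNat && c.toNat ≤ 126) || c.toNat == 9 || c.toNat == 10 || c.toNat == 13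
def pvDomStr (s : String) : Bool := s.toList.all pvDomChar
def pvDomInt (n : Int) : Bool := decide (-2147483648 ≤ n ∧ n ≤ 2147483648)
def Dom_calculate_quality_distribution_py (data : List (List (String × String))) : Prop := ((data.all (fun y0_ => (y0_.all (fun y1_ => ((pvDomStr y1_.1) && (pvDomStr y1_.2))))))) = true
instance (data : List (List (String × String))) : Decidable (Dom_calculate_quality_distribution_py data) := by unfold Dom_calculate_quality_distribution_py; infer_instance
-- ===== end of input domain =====

-- B differs from A by building a frequency table of the lowercased confidence values and
-- reading the four buckets off it (unknown by subtraction), instead of a four-way branch per record.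

-- record.get('contact_confidence', '').lower()  (shared line of both Pythons, ported once)
def pvConfKey (record : List (String × String)) : String :=
  PySem.Str.lower ((PySem.Dict.ofList record).getD "contact_confidence" "")

-- A's loop body: the four-way if/elif classification over the confidence string
def pvStepA (d : PySem.Dict String Int) (confidence : String) : PySem.Dict String Int :=
  if confidence ∈ ["very_high", "high"] then
    d.insert "high_quality" (d.getD "high_quality" 0 + 1)
  else if confidence ∈ ["medium"] then
    d.insert "medium_quality" (d.getD "medium_quality" 0 + 1)
  else if confidence ∈ ["low", "very_low"] then
    d.insert "low_quality" (d.getD "low_quality" 0 + 1)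
  else
    d.insert "unknown_quality" (d.getD "unknown_quality" 0 + 1)

-- ===== PORT A =====
def calculate_quality_distribution_py (data : List (List (String × String))) : List (String × Int) :=
  let dist0 : PySem.Dict String Int :=
    PySem.Dict.ofList [("high_quality", 0), ("medium_quality", 0), ("low_quality", 0), ("unknown_quality", 0)]
  (data.foldl (fun d record => pvStepA d (pvConfKey record)) dist0).items

-- B's loop body: cnt[c] = cnt.get(c, 0) + 1
def pvStepB (d : PySem.Dict String Int) (c : String) : PySem.Dict String Int :=
  d.insert c (d.getD c 0 + 1)

-- ===== PORT B =====
def calculate_quality_distribution_py_alt (data : List (List (String × String))) : List (String × Int) :=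
  let cnt := data.foldl (fun d record => pvStepB d (pvConfKey record)) PySem.Dict.empty
  let high := cnt.getD "very_high" 0 + cnt.getD "high" 0
  let medium := cnt.getD "medium" 0
  let low := cnt.getD "low" 0 + cnt.getD "very_low" 0
  [("high_quality", high), ("medium_quality", medium), ("low_quality", low),
   ("unknown_quality", (data.length : Int) - high - medium - low)]

-- ===== PRECONDITION & SPEC =====
def Spec_calculate_quality_distribution_py (data : List (List (String × String))) (out : List (String × Int)) : Prop := out = calculate_quality_distribution_py_alt data
instance (data : List (List (String × String))) (out : List (String × Int)) : Decidable (Spec_calculate_quality_distribution_py data out) := by unfold Spec_calculate_quality_distribution_py; infer_instance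

-- ===== CLAIM (what is proved, stated in full; the proofs are below) =====
def Claim_equal_calculate_quality_distribution_py : Prop := ∀ (data : List (List (String × String))), Dom_calculate_quality_distribution_py data → Spec_calculate_quality_distribution_py data (calculate_quality_distribution_py data)

-- ===== LEMMAS AND PROOFS =====

-- A's loop state, as a function of its four counters
def pvMkD (a b c u : Int) : PySem.Dict String Int :=
  PySem.Dict.ofList [("high_quality", a), ("medium_quality", b), ("low_quality", c), ("unknown_quality", u)]

lemma pvCore (ks : List String) (a b c u : Int) :
    ks.foldl pvStepA (pvMkD a b c u) =
      pvMkD (a + ((ks.count "very_high" : Int) + ks.count "high"))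
            (b + (ks.count "medium" : Int))
            (c + ((ks.count "low" : Int) + ks.count "very_low"))
            (u + ((ks.length : Int) - ks.count "very_high" - ks.count "high" - ks.count "medium" - ks.count "low" - ks.count "very_low")) := by
  induction ks generalizing a b c u with
  | nil => simp
  | cons k ks ih =>
    simp only [List.foldl_cons]
    by_cases h1 : k ∈ ["very_high", "high"]
    · have hstep : pvStepA (pvMkD a b c u) k = pvMkD (a + 1) b c u := by
        simp only [pvStepA, if_pos h1]; rfl
      simp only [List.mem_cons, List.not_mem_nil, or_false] at h1
      rw [hstep, ih]
      rcases h1 with h | h <;> subst h <;>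
        simp <;> congr 1 <;> omega
    · by_cases h2 : k ∈ ["medium"]
      · have hstep : pvStepA (pvMkD a b c u) k = pvMkD a (b + 1) c u := by
          simp only [pvStepA, if_neg h1, if_pos h2]; rfl
        simp only [List.mem_cons, List.not_mem_nil, or_false] at h1 h2
        rw [hstep, ih]
        subst h2
        simp
        congr 1 <;> omega
      · by_cases h3 : k ∈ ["low", "very_low"]
        · have hstep : pvStepA (pvMkD a b c u) k = pvMkD a b (c + 1) u := by
            simp only [pvStepA, if_neg h1, if_neg h2, if_pos h3]; rfl
          simp only [List.mem_cons, List.not_mem_nil, or_false] at h1 h2 h3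
          rw [hstep, ih]
          rcases h3 with h | h <;> subst h <;>
            simp <;> congr 1 <;> omega
        · have hstep : pvStepA (pvMkD a b c u) k = pvMkD a b c (u + 1) := by
            simp only [pvStepA, if_neg h1, if_neg h2, if_neg h3]; rfl
          simp only [List.mem_cons, List.not_mem_nil, or_false, not_or] at h1 h2 h3
          obtain ⟨e1, e2⟩ := h1
          obtain ⟨e4, e5⟩ := h3
          rw [hstep, ih]
          simp [e1, e2, h2, e4, e5]
          congr 1 <;> omega

-- ===== VERDICT (by name: the statement is the Claim_ definition above) =====
theorem calculate_quality_distribution_py_spec : Claim_equal_calculate_quality_distribution_py := by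
  intro data _
  simp only [Spec_calculate_quality_distribution_py, calculate_quality_distribution_py,
    calculate_quality_distribution_py_alt]
  rw [← List.foldl_map (f := pvConfKey) (g := pvStepA), ← List.foldl_map (f := pvConfKey) (g := pvStepB)]
  rw [show PySem.Dict.ofList [("high_quality", (0:Int)), ("medium_quality", 0), ("low_quality", 0), ("unknown_quality", 0)] = pvMkD 0 0 0 0 from rfl]
  rw [pvCore]
  unfold pvStepB
  simp only [PySem.Dict.getD_foldl_insert_add_one, PySem.Dict.getD_empty]
  simp [pvMkD, PySem.Dict.ofList]
  simp [PySem.Dict.update, PySem.Dict.insert, PySem.Dict.empty,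
    PySem.Dict.contains]
  omega
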